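-- pv_equiv track=rewrite | github.com/tohib09/revula | src/revula/tools/protocol/protocol.py | _boundary_values
-- ===== SOURCE A (Python) =====
-- def _boundary_values(field_size: int) -> list[dict[str, str]]:
--     """Generate boundary values for a field."""
--     values: list[dict[str, str]] = []
--
--     if field_size == 1:
--         for v, desc in [(0, "min"), (1, "min+1"), (0x7E, "max_printable"),
--                         (0x7F, "max_signed"), (0x80, "min_negative"),
--                         (0xFE, "max-1"), (0xFF, "max")]:
--             values.append({"value": f"0x{v:02x}", "description": desc})
--     elif field_size == 2:
--         for v, desc in [(0, "min"), (1, "min+1"), (0x7FFF, "max_signed"),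
--                         (0x8000, "min_negative"), (0xFFFE, "max-1"),
--                         (0xFFFF, "max")]:
--             values.append({"value": f"0x{v:04x}", "description": desc})
--     elif field_size == 4:
--         for v, desc in [(0, "min"), (1, "min+1"), (0x7FFFFFFF, "max_signed"),
--                         (0x80000000, "min_negative"), (0xFFFFFFFE, "max-1"),
--                         (0xFFFFFFFF, "max")]:
--             values.append({"value": f"0x{v:08x}", "description": desc})
--
--     return values
-- ===== SOURCE B (Python) =====
-- def _boundary_values(field_size: int) -> list[dict[str, str]]:
--     """Generate boundary values for a field."""
--     if field_size not in (1, 2, 4):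
--         return []
--     bits = 8 * field_size
--     pairs = [(0, "min"), (1, "min+1")]
--     if field_size == 1:
--         pairs.append((0x7E, "max_printable"))
--     pairs += [(2 ** (bits - 1) - 1, "max_signed"),
--               (2 ** (bits - 1), "min_negative"),
--               (2 ** bits - 2, "max-1"),
--               (2 ** bits - 1, "max")]
--     width = 2 * field_size
--     return [{"value": f"0x{v:0{width}x}", "description": d} for v, d in pairs]
-- ===== Notes on version B (the rewrite author's own statement) =====
-- stated objective: alternative
-- what changed: B derives the boundary values arithmetically from the field width (max_signed = 2**(8s-1)-1, min_negative = 2**(8s-1), max-1, max = 2**(8s)-1, plus the size-1-only printable maximum) instead of storing three literal tables, and formats them in one generic pass with width 2*field_size.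
import Mathlib
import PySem

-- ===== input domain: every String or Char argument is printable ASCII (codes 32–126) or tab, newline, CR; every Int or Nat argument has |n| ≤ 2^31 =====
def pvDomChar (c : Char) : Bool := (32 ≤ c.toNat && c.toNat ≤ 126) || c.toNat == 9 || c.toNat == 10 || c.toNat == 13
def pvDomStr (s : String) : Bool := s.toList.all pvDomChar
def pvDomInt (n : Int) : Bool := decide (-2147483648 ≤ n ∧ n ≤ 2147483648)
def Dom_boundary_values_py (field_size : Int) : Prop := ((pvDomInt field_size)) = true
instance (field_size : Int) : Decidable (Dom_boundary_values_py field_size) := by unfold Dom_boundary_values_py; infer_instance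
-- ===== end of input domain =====

-- One line: B derives the boundary values arithmetically from the field width (powers of two) instead of three literal tables (objective: alternative).
-- ===== PORT A =====
-- Shared helper: Python's f"0x{v:0{w}x}" for a nonnegative v (exact on that domain; both sources use this format).
def pvHexDigit (n : Nat) : Char := if n < 10 then Char.ofNat (48 + n) else Char.ofNat (87 + n)

-- fuel-indexed so the kernel can evaluate it (fuel n ≥ number of hex digits of n)
def pvHexCharsAux : Nat → Nat → List Char
  | 0, _ => []
  | fuel + 1, n => if n = 0 then [] else pvHexCharsAux fuel (n / 16) ++ [pvHexDigit (n % 16)]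

def pvHexChars (n : Nat) : List Char := pvHexCharsAux n n

def pvHexPad (v : Nat) (width : Nat) : String :=
  let ds := if v = 0 then ['0'] else pvHexChars v
  String.ofList ('0' :: 'x' :: (List.replicate (width - ds.length) '0' ++ ds))

def boundary_values_py (field_size : Int) : List (List (String × String)) :=
  let values : List (List (String × String)) := []
  if field_size = 1 then
    [((0 : Int), "min"), (1, "min+1"), (0x7E, "max_printable"),
     (0x7F, "max_signed"), (0x80, "min_negative"),
     (0xFE, "max-1"), (0xFF, "max")].foldl
      (fun values vd => values ++ [[("value", pvHexPad vd.1.toNat 2), ("description", vd.2)]]) values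
  else if field_size = 2 then
    [((0 : Int), "min"), (1, "min+1"), (0x7FFF, "max_signed"),
     (0x8000, "min_negative"), (0xFFFE, "max-1"),
     (0xFFFF, "max")].foldl
      (fun values vd => values ++ [[("value", pvHexPad vd.1.toNat 4), ("description", vd.2)]]) values
  else if field_size = 4 then
    [((0 : Int), "min"), (1, "min+1"), (0x7FFFFFFF, "max_signed"),
     (0x80000000, "min_negative"), (0xFFFFFFFE, "max-1"),
     (0xFFFFFFFF, "max")].foldl
      (fun values vd => values ++ [[("value", pvHexPad vd.1.toNat 8), ("description", vd.2)]]) values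
  else values

-- ===== PORT B =====
def boundary_values_py_alt (field_size : Int) : List (List (String × String)) :=
  if ¬ (field_size = 1 ∨ field_size = 2 ∨ field_size = 4) then []
  else
    let bits : Nat := 8 * field_size.toNat
    let pairs : List (Nat × String) :=
      ([(0, "min"), (1, "min+1")] ++
       (if field_size = 1 then [(0x7E, "max_printable")] else [])) ++
      [(2 ^ (bits - 1) - 1, "max_signed"),
       (2 ^ (bits - 1), "min_negative"),
       (2 ^ bits - 2, "max-1"),
       (2 ^ bits - 1, "max")]
    let width : Nat := 2 * field_size.toNat
    pairs.map (fun vd => [("value", pvHexPad vd.1 width), ("description", vd.2)])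

-- ===== PRECONDITION & SPEC =====
def Spec_boundary_values_py (field_size : Int) (out : List (List (String × String))) : Prop := out = boundary_values_py_alt field_size
instance (field_size : Int) (out : List (List (String × String))) : Decidable (Spec_boundary_values_py field_size out) := by unfold Spec_boundary_values_py; infer_instance

-- ===== CLAIM (what is proved, stated in full; the proofs are below) =====
def Claim_equal_boundary_values_py : Prop := ∀ (field_size : Int), Dom_boundary_values_py field_size → Spec_boundary_values_py field_size (boundary_values_py field_size)

-- ===== LEMMAS AND PROOFS =====

-- ===== VERDICT (by name: the statement is the Claim_ definition above) =====
theorem boundary_values_py_spec : Claim_equal_boundary_values_py := by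
  intro fs _
  unfold Spec_boundary_values_py
  by_cases h1 : fs = 1
  · subst h1; decide
  by_cases h2 : fs = 2
  · subst h2; decide
  by_cases h4 : fs = 4
  · subst h4; decide
  simp [boundary_values_py, boundary_values_py_alt, h1, h2, h4]
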